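-- pv_equiv track=rewrite | github.com/ravipangali7/Kingxclub-Server | core/management/utils.py | _partial_match_score
-- ===== SOURCE A (Python) =====
-- MIN_PARTIAL_OVERLAP = 3
--
-- def _longest_common_substring(s: str, t: str) -> int:
--     """Length of longest common substring of s and t (for flexible matching e.g. ravigame vs ravilib -> ravi)."""
--     if not s or not t:
--         return 0
--     m, n = len(s), len(t)
--     # dp[i][j] = length of LCS ending at s[i-1], t[j-1]
--     prev = [0] * (n + 1)
--     best = 0
--     for i in range(1, m + 1):
--         curr = [0] * (n + 1)
--         for j in range(1, n + 1):
--             if s[i - 1] == t[j - 1]: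
--                 curr[j] = prev[j - 1] + 1
--                 best = max(best, curr[j])
--             else:
--                 curr[j] = 0
--         prev = curr
--     return best
--
-- def _partial_match_score(game_norm: str, stem_norm: str) -> int | None:
--     """
--     Powerful partial match: containment (ravi in ravigame), prefix/suffix, or longest common substring (ravigame vs ravilib).
--     Returns best score for ranking; None if overlap below MIN_PARTIAL_OVERLAP.
--     """
--     if not game_norm or not stem_norm:
--         return None
--     scores: list[int] = []
--
--     # Exact equality
--     if game_norm == stem_norm:
--         return len(game_norm) * 2
--
--     # One contains the other (ravi <-> ravigame, ravi <-> ravilib)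
--     if game_norm in stem_norm:
--         scores.append(len(game_norm))
--     if stem_norm in game_norm:
--         scores.append(len(stem_norm))
--
--     # Common prefix (ravi + ravigame -> 4)
--     prefix = 0
--     for i in range(min(len(game_norm), len(stem_norm))):
--         if game_norm[i] == stem_norm[i]:
--             prefix += 1
--         else:
--             break
--     if prefix >= MIN_PARTIAL_OVERLAP:
--         scores.append(prefix)
--
--     # Common suffix
--     suffix = 0
--     for i in range(1, min(len(game_norm), len(stem_norm)) + 1):
--         if game_norm[-i] == stem_norm[-i]:
--             suffix += 1
--         else:
--             break
--     if suffix >= MIN_PARTIAL_OVERLAP: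
--         scores.append(suffix)
--
--     # Longest common substring when neither contains the other (e.g. ravigame vs ravilib -> ravi = 4)
--     lcs = _longest_common_substring(game_norm, stem_norm)
--     if lcs >= MIN_PARTIAL_OVERLAP:
--         scores.append(lcs)
--
--     return max(scores) if scores else None
-- ===== SOURCE B (Python) =====
-- MIN_PARTIAL_OVERLAP = 3
--
-- def _partial_match_score(game_norm, stem_norm):
--     """Same result as A: equality fast path, containment fast path, otherwise a single
--     diagonal run-scan computing the longest common substring (prefix/suffix scans are
--     redundant: a common prefix/suffix IS a common substring, so never exceeds the LCS)."""
--     if not game_norm or not stem_norm: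
--         return None
--     if game_norm == stem_norm:
--         return len(game_norm) * 2
--     if game_norm in stem_norm:
--         return len(game_norm)
--     if stem_norm in game_norm:
--         return len(stem_norm)
--     m, n = len(game_norm), len(stem_norm)
--     best = 0
--     for d in range(-(m - 1), n):
--         run = 0
--         i = -d if d < 0 else 0
--         while i < m and i + d < n:
--             if game_norm[i] == stem_norm[i + d]:
--                 run += 1
--                 if run > best:
--                     best = run
--             else:
--                 run = 0
--             i += 1
--     return best if best >= MIN_PARTIAL_OVERLAP else None
-- ===== Notes on version B (the rewrite author's own statement) =====
-- stated objective: alternative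
-- what changed: B drops A's prefix/suffix scans and separate containment scoring entirely (a common prefix/suffix/contained string is a common substring, so never beats the LCS): after equality and containment fast paths it computes the longest common substring by a single diagonal run-scan with two integer registers instead of A's row dynamic programming with per-row list allocation.
import Mathlib
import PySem

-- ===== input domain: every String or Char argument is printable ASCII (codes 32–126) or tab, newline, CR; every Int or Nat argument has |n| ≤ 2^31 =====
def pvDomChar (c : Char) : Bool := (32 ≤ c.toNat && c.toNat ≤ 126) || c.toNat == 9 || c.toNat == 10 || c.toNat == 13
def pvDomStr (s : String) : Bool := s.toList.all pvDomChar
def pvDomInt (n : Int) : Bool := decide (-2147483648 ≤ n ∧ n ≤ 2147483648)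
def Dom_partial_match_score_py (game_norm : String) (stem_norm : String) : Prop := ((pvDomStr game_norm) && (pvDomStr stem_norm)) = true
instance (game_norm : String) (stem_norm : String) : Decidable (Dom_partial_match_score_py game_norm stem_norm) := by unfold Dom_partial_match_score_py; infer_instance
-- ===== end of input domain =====

-- B replaces A's prefix/suffix scans and containment scoring by a single diagonal run-scan
-- computing the longest common substring (objective: alternative algorithm, same worst-case cost).

-- ===== PORT A =====

def pvMIN_PARTIAL_OVERLAP : Int := 3

-- A's `_longest_common_substring`: row DP, `prev`/`curr` lists, running `best`.
-- All indices are in range where Python reads/writes them, so `pyGetD _ _ 0` and `List.set`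
-- are exact for Python's `prev[j-1]` and `curr[j] = v`.
def pvLcsA (s t : List Char) : Int :=
  if s = [] ∨ t = [] then 0
  else
    let m : Int := s.length
    let n : Int := t.length
    let res := (PySem.List.pyRange 1 (m + 1) 1).foldl
      (fun (pb : List Int × Int) i =>
        let inner := (PySem.List.pyRange 1 (n + 1) 1).foldl
          (fun (cb : List Int × Int) j =>
            if PySem.List.pyGet? s (i - 1) == PySem.List.pyGet? t (j - 1) then
              let v := PySem.List.pyGetD pb.1 (j - 1) 0 + 1
              (cb.1.set j.toNat v, max cb.2 v)
            else
              (cb.1.set j.toNat 0, cb.2))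
          (List.replicate (n + 1).toNat 0, pb.2)
        (inner.1, inner.2))
      (List.replicate (n + 1).toNat 0, 0)
    res.2

-- A's common-prefix loop: `for i in range(min(m, n)): if g[i] == s[i]: prefix += 1 else: break`.
def pvPrefLoopA (g st : List Char) (idxs : List Int) (p : Int) : Int :=
  match idxs with
  | [] => p
  | i :: rest =>
    if PySem.List.pyGet? g i == PySem.List.pyGet? st i then pvPrefLoopA g st rest (p + 1) else p

-- A's common-suffix loop: `for i in range(1, min(m, n) + 1): if g[-i] == s[-i]: suffix += 1 else: break`.
def pvSufLoopA (g st : List Char) (idxs : List Int) (p : Int) : Int :=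
  match idxs with
  | [] => p
  | i :: rest =>
    if PySem.List.pyGet? g (-i) == PySem.List.pyGet? st (-i) then pvSufLoopA g st rest (p + 1) else p

def partial_match_score_py (game_norm : String) (stem_norm : String) : Option Int :=
  let g := game_norm.toList
  let st := stem_norm.toList
  if g = [] ∨ st = [] then none
  else if g = st then some ((g.length : Int) * 2)
  else
    let scores : List Int := []
    let scores := if PySem.Chars.isIn g st then scores ++ [(g.length : Int)] else scores
    let scores := if PySem.Chars.isIn st g then scores ++ [(st.length : Int)] else scores
    let pref := pvPrefLoopA g st (PySem.List.pyRange 0 (min (g.length : Int) (st.length : Int)) 1) 0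
    let scores := if pref ≥ pvMIN_PARTIAL_OVERLAP then scores ++ [pref] else scores
    let suff := pvSufLoopA g st (PySem.List.pyRange 1 (min (g.length : Int) (st.length : Int) + 1) 1) 0
    let scores := if suff ≥ pvMIN_PARTIAL_OVERLAP then scores ++ [suff] else scores
    let lcs := pvLcsA g st
    let scores := if lcs ≥ pvMIN_PARTIAL_OVERLAP then scores ++ [lcs] else scores
    -- `max(scores) if scores else None`: PySem.List.max? is none exactly on []
    PySem.List.max? scores (fun x => x)

-- ===== PORT B =====

-- B's inner `while i < m and i + d < n` loop along one diagonal; fuel = m bounds the trip count.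
def pvWhileB (g st : List Char) (d : Int) : Nat → Int → Int → Int → Int
  | 0, _, _, best => best
  | fuel + 1, i, run, best =>
    if i < (g.length : Int) ∧ i + d < (st.length : Int) then
      if PySem.List.pyGet? g i == PySem.List.pyGet? st (i + d) then
        pvWhileB g st d fuel (i + 1) (run + 1) (if run + 1 > best then run + 1 else best)
      else
        pvWhileB g st d fuel (i + 1) 0 best
    else best

def partial_match_score_py_alt (game_norm : String) (stem_norm : String) : Option Int :=
  let g := game_norm.toList
  let st := stem_norm.toList
  if g = [] ∨ st = [] then none
  else if g = st then some ((g.length : Int) * 2)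
  else if PySem.Chars.isIn g st then some (g.length : Int)
  else if PySem.Chars.isIn st g then some (st.length : Int)
  else
    let m : Int := g.length
    let n : Int := st.length
    let best := (PySem.List.pyRange (-(m - 1)) n 1).foldl
      (fun best d => pvWhileB g st d g.length (if d < 0 then -d else 0) 0 best) 0
    if best ≥ pvMIN_PARTIAL_OVERLAP then some best else none

-- ===== PRECONDITION & SPEC =====
def Spec_partial_match_score_py (game_norm : String) (stem_norm : String) (out : Option Int) : Prop := out = partial_match_score_py_alt game_norm stem_norm
instance (game_norm : String) (stem_norm : String) (out : Option Int) : Decidable (Spec_partial_match_score_py game_norm stem_norm out) := by unfold Spec_partial_match_score_py; infer_instance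

-- ===== CLAIM (what is proved, stated in full; the proofs are below) =====
def Claim_equal_partial_match_score_py : Prop := ∀ (game_norm : String) (stem_norm : String), Dom_partial_match_score_py game_norm stem_norm → Spec_partial_match_score_py game_norm stem_norm (partial_match_score_py game_norm stem_norm)

-- ===== LEMMAS AND PROOFS =====

-- `chEq s t i j` = both indices are in range and the characters agree.
def chEq (s t : List Char) (i j : Nat) : Bool :=
  match s[i]?, t[j]? with
  | some a, some b => a == b
  | _, _ => false

-- Length of the common run of equal characters ending at cell (i, j) (DP value of both programs).
def runTo (s t : List Char) : Nat → Nat → Nat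
  | 0, j => if chEq s t 0 j then 1 else 0
  | i + 1, 0 => if chEq s t (i + 1) 0 then 1 else 0
  | i + 1, j + 1 => if chEq s t (i + 1) (j + 1) then runTo s t i j + 1 else 0

-- The value sitting "up-left" of cell (i, j): 0 on the borders, else runTo (i-1) (j-1).
def pvUp (s t : List Char) : Nat → Nat → Nat
  | i + 1, j + 1 => runTo s t i j
  | _, _ => 0

-- Longest common substring length (as Int) = max of runTo over all cells.
def bestAll (s t : List Char) : Int :=
  (List.range s.length).foldl
    (fun b i => (List.range t.length).foldl (fun b j => max b (runTo s t i j : Int)) b) 0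

-- Structural common-prefix length.
def cp : List Char → List Char → Nat
  | a :: as, b :: bs => if a = b then cp as bs + 1 else 0
  | _, _ => 0


-- ---- generic fold-with-max helpers (Int accumulator) ----

lemma pv_foldl_le_mono {α : Type} (L : List α) (g : Int → α → Int)
    (h : ∀ b x, x ∈ L → b ≤ g b x) (b : Int) : b ≤ L.foldl g b := by
  induction L generalizing b with
  | nil => simp
  | cons y ys ih =>
    simp only [List.foldl_cons]
    exact le_trans (h b y (by simp)) (ih (fun b x hx => h b x (by simp [hx])) _)

lemma pv_le_foldl_of_mem {α : Type} (L : List α) (g : Int → α → Int)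
    (h : ∀ b x, x ∈ L → b ≤ g b x) {d : α} (hd : d ∈ L) {x : Int}
    (hx : ∀ b, x ≤ g b d) (b : Int) : x ≤ L.foldl g b := by
  induction L generalizing b with
  | nil => simp at hd
  | cons y ys ih =>
    simp only [List.foldl_cons]
    rcases List.mem_cons.mp hd with rfl | hd'
    · exact le_trans (hx b) (pv_foldl_le_mono ys g (fun b x hx => h b x (by simp [hx])) _)
    · exact ih (fun b x hx => h b x (by simp [hx])) hd' _

lemma pv_foldl_le_of {α : Type} (L : List α) (g : Int → α → Int) (c : Int)
    (h : ∀ b x, x ∈ L → b ≤ c → g b x ≤ c) (b : Int) (hb : b ≤ c) : L.foldl g b ≤ c := by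
  induction L generalizing b with
  | nil => simpa
  | cons y ys ih =>
    simp only [List.foldl_cons]
    exact ih (fun b x hx => h b x (by simp [hx])) _ (h b y (by simp) hb)

-- ---- runTo basics ----

lemma chEq_of_getElem? {s t : List Char} {i j : Nat} (hi : i < s.length) (hj : j < t.length)
    (h : s[i]? = t[j]?) : chEq s t i j = true := by
  unfold chEq
  rw [List.getElem?_eq_getElem hi, List.getElem?_eq_getElem hj]
  rw [List.getElem?_eq_getElem hi, List.getElem?_eq_getElem hj] at h
  simp_all

lemma chEq_true_elim {s t : List Char} {i j : Nat} (h : chEq s t i j = true) :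
    i < s.length ∧ j < t.length ∧ s[i]? = t[j]? := by
  unfold chEq at h
  rcases hs : s[i]? with _ | a <;> rcases ht : t[j]? with _ | b <;> rw [hs, ht] at h
  · exact absurd h (by simp)
  · exact absurd h (by simp)
  · exact absurd h (by simp)
  · have hi : i < s.length := by
      by_contra hc
      rw [List.getElem?_eq_none (by omega)] at hs; exact absurd hs (by simp)
    have hj : j < t.length := by
      by_contra hc
      rw [List.getElem?_eq_none (by omega)] at ht; exact absurd ht (by simp)
    refine ⟨hi, hj, ?_⟩
    have : a = b := by simpa using h
    simp [this]

lemma runTo_eq_ite (s t : List Char) (i j : Nat) :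
    runTo s t i j = if chEq s t i j then pvUp s t i j + 1 else 0 := by
  match i, j with
  | 0, j => simp [runTo, pvUp]
  | i + 1, 0 => simp [runTo, pvUp]
  | i + 1, j + 1 => simp [runTo, pvUp]

lemma runTo_le_left (s t : List Char) (i j : Nat) : runTo s t i j ≤ i + 1 := by
  induction i generalizing j with
  | zero => cases j <;> simp only [runTo] <;> split <;> omega
  | succ i ih =>
    cases j with
    | zero => simp only [runTo]; split <;> omega
    | succ j =>
      simp only [runTo]
      split
      · have := ih j; omega
      · omega

lemma runTo_le_right (s t : List Char) (i j : Nat) : runTo s t i j ≤ j + 1 := by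
  induction i generalizing j with
  | zero => cases j <;> simp only [runTo] <;> split <;> omega
  | succ i ih =>
    cases j with
    | zero => simp only [runTo]; split <;> omega
    | succ j =>
      simp only [runTo]
      split
      · have := ih j; omega
      · omega

lemma runTo_ge (s t : List Char) :
    ∀ (q i j : Nat), 1 ≤ q → q ≤ i + 1 → q ≤ j + 1 →
      (∀ k, k < q → chEq s t (i - k) (j - k) = true) → q ≤ runTo s t i j := by
  intro q
  induction q with
  | zero => omega
  | succ q ih =>
    intro i j _ hqi hqj h
    have hc : chEq s t i j = true := by have := h 0 (by omega); simpa using this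
    rw [runTo_eq_ite, if_pos hc]
    cases q with
    | zero => omega
    | succ q' =>
      obtain ⟨i', rfl⟩ : ∃ i', i = i' + 1 := ⟨i - 1, by omega⟩
      obtain ⟨j', rfl⟩ : ∃ j', j = j' + 1 := ⟨j - 1, by omega⟩
      have hrec := ih i' j' (by omega) (by omega) (by omega)
        (fun k hk => by have := h (k + 1) (by omega); simpa [Nat.succ_sub_succ] using this)
      have : pvUp s t (i' + 1) (j' + 1) = runTo s t i' j' := rfl
      omega


-- ---- bestAll characterization ----

lemma bestAll_nonneg (s t : List Char) : 0 ≤ bestAll s t := by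
  unfold bestAll
  apply pv_foldl_le_mono
  intro b i _
  apply pv_foldl_le_mono
  intro b' j _
  exact le_max_left _ _

lemma bestAll_ub (s t : List Char) {i j : Nat} (hi : i < s.length) (hj : j < t.length) :
    (runTo s t i j : Int) ≤ bestAll s t := by
  unfold bestAll
  apply pv_le_foldl_of_mem
  · intro b x _
    apply pv_foldl_le_mono
    intro b' j' _
    exact le_max_left _ _
  · exact List.mem_range.mpr hi
  · intro b
    apply pv_le_foldl_of_mem
    · intro b' x _; exact le_max_left _ _
    · exact List.mem_range.mpr hj
    · intro b'; exact le_max_right _ _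

lemma bestAll_le_of (s t : List Char) {c : Int}
    (h : ∀ i j : Nat, i < s.length → j < t.length → (runTo s t i j : Int) ≤ c) (hc : 0 ≤ c) :
    bestAll s t ≤ c := by
  unfold bestAll
  apply pv_foldl_le_of
  · intro b i hi hb
    apply pv_foldl_le_of
    · intro b' j hj hb'
      exact max_le hb' (h i j (List.mem_range.mp hi) (List.mem_range.mp hj))
    · exact hb
  · exact hc

-- ---- common prefix ----

lemma cp_le_left : ∀ (a b : List Char), cp a b ≤ a.length := by
  intro a
  induction a with
  | nil => intro b; cases b <;> simp [cp]
  | cons x xs ih =>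
    intro b
    cases b with
    | nil => simp [cp]
    | cons y ys =>
      simp only [cp]
      split
      · have := ih ys; simp; omega
      · simp

lemma cp_le_right : ∀ (a b : List Char), cp a b ≤ b.length := by
  intro a
  induction a with
  | nil => intro b; cases b <;> simp [cp]
  | cons x xs ih =>
    intro b
    cases b with
    | nil => simp [cp]
    | cons y ys =>
      simp only [cp]
      split
      · have := ih ys; simp; omega
      · simp

lemma cp_lt_spec : ∀ (a b : List Char) (k : Nat), k < cp a b → a[k]? = b[k]? := by
  intro a
  induction a with
  | nil => intro b k hk; cases b <;> simp [cp] at hk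
  | cons x xs ih =>
    intro b k hk
    cases b with
    | nil => simp [cp] at hk
    | cons y ys =>
      simp only [cp] at hk
      split at hk
      · next he =>
        cases k with
        | zero => simp [he]
        | succ k => simpa using ih ys k (by omega)
      · omega

lemma cp_le_bestAll (s t : List Char) (h : 1 ≤ cp s t) : (cp s t : Int) ≤ bestAll s t := by
  set q := cp s t with hq
  have hqs : q ≤ s.length := cp_le_left s t
  have hqt : q ≤ t.length := cp_le_right s t
  have hrun : q ≤ runTo s t (q - 1) (q - 1) := by
    apply runTo_ge s t q (q - 1) (q - 1) h (by omega) (by omega)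
    intro k hk
    apply chEq_of_getElem? (by omega) (by omega)
    exact cp_lt_spec s t (q - 1 - k) (by omega)
  have hub := bestAll_ub s t (i := q - 1) (j := q - 1) (by omega) (by omega)
  omega

lemma csuf_le_bestAll (s t : List Char) (h : 1 ≤ cp s.reverse t.reverse) :
    (cp s.reverse t.reverse : Int) ≤ bestAll s t := by
  set q := cp s.reverse t.reverse with hq
  have hqs : q ≤ s.length := by have := cp_le_left s.reverse t.reverse; simpa using this
  have hqt : q ≤ t.length := by have := cp_le_right s.reverse t.reverse; simpa using this
  have hrun : q ≤ runTo s t (s.length - 1) (t.length - 1) := by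
    apply runTo_ge s t q (s.length - 1) (t.length - 1) h (by omega) (by omega)
    intro k hk
    have hrev := cp_lt_spec s.reverse t.reverse k (by omega)
    rw [List.getElem?_reverse (by omega), List.getElem?_reverse (by omega)] at hrev
    have h1 : s.length - 1 - k = s.length - 1 - k := rfl
    apply chEq_of_getElem? (by omega) (by omega)
    exact hrev
  have hub := bestAll_ub s t (i := s.length - 1) (j := t.length - 1) (by omega) (by omega)
  omega

-- ---- containment forces bestAll = length ----

lemma infix_bestAll {g st : List Char} (hg : g ≠ []) (h : g <:+: st) :
    bestAll g st = (g.length : Int) := by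
  obtain ⟨u, v, rfl⟩ := h
  have hm : 1 ≤ g.length := List.length_pos_iff.mpr hg
  have hlen : (u ++ g ++ v).length = u.length + g.length + v.length := by simp; omega
  have hrun : g.length ≤ runTo g (u ++ g ++ v) (g.length - 1) (u.length + g.length - 1) := by
    apply runTo_ge _ _ g.length _ _ (by omega) (by omega) (by omega)
    intro k hk
    apply chEq_of_getElem? (by omega) (by simp; omega)
    have hx : u.length + g.length - 1 - k = u.length + (g.length - 1 - k) := by omega
    rw [hx, List.append_assoc, List.getElem?_append_right (by omega)]
    have hy : u.length + (g.length - 1 - k) - u.length = g.length - 1 - k := by omega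
    rw [hy, List.getElem?_append_left (by omega)]
  have hub := bestAll_ub g (u ++ g ++ v) (i := g.length - 1) (j := u.length + g.length - 1)
    (by omega) (by simp; omega)
  have hle : bestAll g (u ++ g ++ v) ≤ (g.length : Int) := by
    apply bestAll_le_of
    · intro i j hi hj
      have := runTo_le_left g (u ++ g ++ v) i j
      omega
    · omega
  omega


-- ---- A's prefix and suffix loops compute cp on the strings / their reverses ----

lemma cp_nil_left (b : List Char) : cp [] b = 0 := by cases b <;> simp [cp]
lemma cp_nil_right (a : List Char) : cp a [] = 0 := by cases a <;> simp [cp]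

lemma prefLoopA_spec (g st : List Char) :
    ∀ (fu k : Nat) (p : Int), min g.length st.length - k = fu → k ≤ min g.length st.length →
      pvPrefLoopA g st (PySem.List.pyRange (k : Int) (min (g.length : Int) (st.length : Int)) 1) p
        = p + cp (g.drop k) (st.drop k) := by
  intro fu
  induction fu with
  | zero =>
    intro k p hfu hk
    have hM : min (g.length : Int) (st.length : Int) ≤ (k : Int) := by
      rw [← Nat.cast_min]
      omega
    rw [PySem.List.pyRange_one_eq_nil hM]
    simp only [pvPrefLoopA]
    have : cp (g.drop k) (st.drop k) = 0 := by
      rcases Nat.le_total g.length st.length with h | h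
      · rw [List.drop_eq_nil_of_le (by omega), cp_nil_left]
      · rw [List.drop_eq_nil_of_le (as := st) (by omega), cp_nil_right]
    omega
  | succ fu ih =>
    intro k p hfu hk
    have hkg : k < g.length := by omega
    have hkt : k < st.length := by omega
    have hlt : (k : Int) < min (g.length : Int) (st.length : Int) := by
      rw [← Nat.cast_min]
      omega
    rw [PySem.List.pyRange_one_cons hlt]
    simp only [pvPrefLoopA]
    rw [List.drop_eq_getElem_cons hkg, List.drop_eq_getElem_cons hkt]
    simp only [PySem.List.pyGet?_natCast, List.getElem?_eq_getElem hkg,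
      List.getElem?_eq_getElem hkt]
    have hcast : ((k : Int) + 1) = ((k + 1 : Nat) : Int) := by push_cast; ring
    by_cases he : g[k] = st[k]
    · rw [if_pos (by simp [he]), hcast, ih (k + 1) (p + 1) (by omega) (by omega)]
      simp only [cp, if_pos he]
      push_cast
      ring
    · rw [if_neg (by simp [he])]
      simp only [cp, if_neg he]
      omega

lemma sufLoopA_spec (g st : List Char) :
    ∀ (fu k : Nat) (p : Int), min g.length st.length + 1 - k = fu → 1 ≤ k →
      k ≤ min g.length st.length + 1 →
      pvSufLoopA g st (PySem.List.pyRange (k : Int) (min (g.length : Int) (st.length : Int) + 1) 1) p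
        = p + cp (g.reverse.drop (k - 1)) (st.reverse.drop (k - 1)) := by
  intro fu
  induction fu with
  | zero =>
    intro k p hfu hk1 hk
    have hM : min (g.length : Int) (st.length : Int) + 1 ≤ (k : Int) := by
      rw [← Nat.cast_min]
      omega
    rw [PySem.List.pyRange_one_eq_nil hM]
    simp only [pvSufLoopA]
    have : cp (g.reverse.drop (k - 1)) (st.reverse.drop (k - 1)) = 0 := by
      rcases Nat.le_total g.length st.length with h | h
      · rw [List.drop_eq_nil_of_le (by simp; omega), cp_nil_left]
      · rw [List.drop_eq_nil_of_le (as := st.reverse) (by simp; omega), cp_nil_right]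
    omega
  | succ fu ih =>
    intro k p hfu hk1 hk
    have hkg : k ≤ g.length := by omega
    have hkt : k ≤ st.length := by omega
    have hlt : (k : Int) < min (g.length : Int) (st.length : Int) + 1 := by
      rw [← Nat.cast_min]
      omega
    rw [PySem.List.pyRange_one_cons hlt]
    simp only [pvSufLoopA]
    have hg1 : k - 1 < g.reverse.length := by simp; omega
    have ht1 : k - 1 < st.reverse.length := by simp; omega
    rw [List.drop_eq_getElem_cons hg1, List.drop_eq_getElem_cons ht1]
    rw [PySem.List.pyGet?_neg_natCast g k (by omega) hkg,
        PySem.List.pyGet?_neg_natCast st k (by omega) hkt]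
    have hgv : g.reverse[k - 1] = g[g.length - k]'(by omega) := by
      rw [List.getElem_reverse]
      congr 1
      omega
    have htv : st.reverse[k - 1] = st[st.length - k]'(by omega) := by
      rw [List.getElem_reverse]
      congr 1
      omega
    simp only [List.getElem?_eq_getElem (show g.length - k < g.length by omega),
      List.getElem?_eq_getElem (show st.length - k < st.length by omega)]
    have hcast : ((k : Int) + 1) = ((k + 1 : Nat) : Int) := by push_cast; ring
    by_cases he : g.reverse[k - 1] = st.reverse[k - 1]
    · rw [if_pos (by rw [hgv, htv] at he; simp [he]), hcast,
        ih (k + 1) (p + 1) (by omega) (by omega) (by omega)]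
      simp only [cp, if_pos he]
      have : k + 1 - 1 = (k - 1) + 1 := by omega
      rw [this]
      push_cast
      ring
    · rw [if_neg (by rw [hgv, htv] at he; simp [he])]
      simp only [cp, if_neg he]
      omega


-- ---- B's diagonal scan computes bestAll ----

lemma pvUp_eq_run {g st : List Char} {i : Int} (d : Int) (_hi : 0 ≤ i) (_hd : 0 ≤ i + d) :
    (pvUp g st i.toNat (i + d).toNat : Int)
      = if 1 ≤ i ∧ 1 ≤ i + d then (runTo g st (i - 1).toNat (i + d - 1).toNat : Int) else 0 := by
  by_cases h1 : 1 ≤ i ∧ 1 ≤ i + d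
  · rw [if_pos h1]
    have e1 : i.toNat = (i - 1).toNat + 1 := by omega
    have e2 : (i + d).toNat = (i + d - 1).toNat + 1 := by omega
    rw [e1, e2]
    rfl
  · rw [if_neg h1]
    have h0 : i.toNat = 0 ∨ (i + d).toNat = 0 := by omega
    rcases hv : i.toNat with _ | p <;> rcases hw : (i + d).toNat with _ | q
    · rfl
    · rfl
    · rfl
    · omega

lemma whileB_spec (g st : List Char) (d : Int) :
    ∀ (fuel : Nat) (i run best : Int),
      (g.length : Int) - i ≤ fuel → 0 ≤ i → 0 ≤ i + d →
      run = (if 1 ≤ i ∧ 1 ≤ i + d then (runTo g st (i - 1).toNat (i + d - 1).toNat : Int) else 0) →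
      0 ≤ best →
      pvWhileB g st d fuel i run best =
        (PySem.List.pyRange i (min (g.length : Int) ((st.length : Int) - d)) 1).foldl
          (fun b k => max b (runTo g st k.toNat (k + d).toNat : Int)) best := by
  intro fuel
  induction fuel with
  | zero =>
    intro i run best hfu hi hd hrun hb
    have hnil : min (g.length : Int) ((st.length : Int) - d) ≤ i :=
      le_trans (min_le_left _ _) (by omega)
    rw [PySem.List.pyRange_one_eq_nil hnil]
    rfl
  | succ fuel ih =>
    intro i run best hfu hi hd hrun hb
    simp only [pvWhileB]
    by_cases hcond : i < (g.length : Int) ∧ i + d < (st.length : Int)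
    · rw [if_pos hcond]
      have hlt : i < min (g.length : Int) ((st.length : Int) - d) := by
        rw [lt_min_iff]; omega
      rw [PySem.List.pyRange_one_cons hlt]
      simp only [List.foldl_cons]
      have hig : i.toNat < g.length := by omega
      have hit : (i + d).toNat < st.length := by omega
      rw [PySem.List.pyGet?_of_nonneg g hi, PySem.List.pyGet?_of_nonneg st hd,
        List.getElem?_eq_getElem hig, List.getElem?_eq_getElem hit]
      have hrun0 : 0 ≤ run := by rw [hrun]; split <;> simp
      by_cases he : g[i.toNat] = st[(i + d).toNat]
      · rw [if_pos (by simp [he])]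
        have hch : chEq g st i.toNat (i + d).toNat = true :=
          chEq_of_getElem? hig hit (by simp [hig, hit, he])
        have hcell : (runTo g st i.toNat (i + d).toNat : Int) = run + 1 := by
          rw [runTo_eq_ite, if_pos hch]
          push_cast
          rw [pvUp_eq_run d hi hd, ← hrun]
        have hbest' : (if run + 1 > best then run + 1 else best)
            = max best (runTo g st i.toNat (i + d).toNat : Int) := by
          rw [hcell]
          rcases le_total (run + 1) best with h | h
          · rw [if_neg (by omega), max_eq_left h]
          · rcases lt_or_eq_of_le h with h' | h'
            · rw [if_pos (by omega), max_eq_right h]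
            · rw [← h']; simp
        rw [hbest']
        have hinv : run + 1 = if 1 ≤ i + 1 ∧ 1 ≤ i + 1 + d
            then (runTo g st (i + 1 - 1).toNat (i + 1 + d - 1).toNat : Int) else 0 := by
          rw [if_pos ⟨by omega, by omega⟩]
          have e1 : (i + 1 - 1).toNat = i.toNat := by omega
          have e2 : (i + 1 + d - 1).toNat = (i + d).toNat := by omega
          rw [e1, e2, hcell]
        exact ih (i + 1) (run + 1) _ (by omega) (by omega) (by omega) hinv
          (le_trans hb (le_max_left _ _))
      · rw [if_neg (by simp [he])]
        have hch : chEq g st i.toNat (i + d).toNat = false := by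
          by_contra hc
          have := chEq_true_elim (by simpa using (Bool.not_eq_false _).mp hc)
          rw [List.getElem?_eq_getElem hig, List.getElem?_eq_getElem hit] at this
          exact he (by simpa using this.2.2)
        have hcell : runTo g st i.toNat (i + d).toNat = 0 := by
          rw [runTo_eq_ite, hch]
          rfl
        have hinv : (0 : Int) = if 1 ≤ i + 1 ∧ 1 ≤ i + 1 + d
            then (runTo g st (i + 1 - 1).toNat (i + 1 + d - 1).toNat : Int) else 0 := by
          rw [if_pos ⟨by omega, by omega⟩]
          have e1 : (i + 1 - 1).toNat = i.toNat := by omega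
          have e2 : (i + 1 + d - 1).toNat = (i + d).toNat := by omega
          rw [e1, e2, hcell]
          simp
        rw [hcell]
        simp only [Nat.cast_zero, max_eq_left hb]
        exact ih (i + 1) 0 best (by omega) (by omega) (by omega) hinv hb
    · rw [if_neg hcond]
      have hnil : min (g.length : Int) ((st.length : Int) - d) ≤ i := by
        rcases not_and_or.mp hcond with h | h
        · exact le_trans (min_le_left _ _) (by omega)
        · exact le_trans (min_le_right _ _) (by omega)
      rw [PySem.List.pyRange_one_eq_nil hnil]
      rfl

lemma altBest_eq (g st : List Char) :
    (PySem.List.pyRange (-((g.length : Int) - 1)) (st.length : Int) 1).foldl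
      (fun best d => pvWhileB g st d g.length (if d < 0 then -d else 0) 0 best) 0
      = bestAll g st := by
  have hrw : ∀ (L : List Int) (b : Int), 0 ≤ b →
      L.foldl (fun best d => pvWhileB g st d g.length (if d < 0 then -d else 0) 0 best) b
        = L.foldl (fun best d =>
            (PySem.List.pyRange (if d < 0 then -d else 0)
                (min (g.length : Int) ((st.length : Int) - d)) 1).foldl
              (fun bb k => max bb (runTo g st k.toNat (k + d).toNat : Int)) best) b := by
    intro L
    induction L with
    | nil => intro b hb; rfl
    | cons d ds ih =>
      intro b hb
      simp only [List.foldl_cons]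
      have hrunv : (0 : Int) = if 1 ≤ (if d < 0 then -d else 0) ∧ 1 ≤ (if d < 0 then -d else 0) + d
          then (runTo g st ((if d < 0 then -d else 0) - 1).toNat
            ((if d < 0 then -d else 0) + d - 1).toNat : Int) else 0 := by
        rcases lt_or_ge d 0 with h | h
        · rw [if_pos h, if_neg (by omega)]
        · rw [if_neg (by omega)]
      rw [whileB_spec g st d g.length _ _ _ (by split <;> omega) (by split <;> omega)
        (by split <;> omega) hrunv hb]
      exact ih _ (le_trans hb (pv_foldl_le_mono _ _ (fun b' x _ => le_max_left _ _) b))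
  rw [hrw _ 0 le_rfl]
  set F := fun (best : Int) (d : Int) =>
      (PySem.List.pyRange (if d < 0 then -d else 0)
          (min (g.length : Int) ((st.length : Int) - d)) 1).foldl
        (fun bb k => max bb (runTo g st k.toNat (k + d).toNat : Int)) best with hF
  have hmono : ∀ (b : Int) (d : Int), b ≤ F b d := by
    intro b d
    exact pv_foldl_le_mono _ _ (fun b' x _ => le_max_left _ _) b
  apply le_antisymm
  · -- fold ≤ bestAll
    apply pv_foldl_le_of _ _ (bestAll g st) _ 0 (bestAll_nonneg g st)
    intro b d hdmem hb
    apply pv_foldl_le_of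
    · intro bb k hk hbb
      apply max_le hbb
      have hkm := PySem.List.mem_pyRange_one.mp hk
      have hk0 : 0 ≤ k := by rcases hkm with ⟨h1, _⟩; split at h1 <;> omega
      have hkd : 0 ≤ k + d := by rcases hkm with ⟨h1, _⟩; split at h1 <;> omega
      have hk2 := hkm.2
      rw [lt_min_iff] at hk2
      exact bestAll_ub g st (by omega) (by omega)
    · exact hb
  · -- bestAll ≤ fold
    apply bestAll_le_of
    · intro i j hi hj
      apply pv_le_foldl_of_mem _ _ (fun b x _ => hmono b x) (d := (j : Int) - (i : Int))
      · exact PySem.List.mem_pyRange_one.mpr ⟨by omega, by omega⟩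
      · intro b
        apply pv_le_foldl_of_mem _ _ (fun b' x _ => le_max_left _ _) (d := (i : Int))
        · apply PySem.List.mem_pyRange_one.mpr
          constructor
          · split <;> omega
          · rw [lt_min_iff]; omega
        · intro b'
          have e1 : ((i : Int)).toNat = i := by omega
          have e2 : ((i : Int) + ((j : Int) - (i : Int))).toNat = j := by omega
          rw [e1, e2]
          exact le_max_right _ _
    · apply pv_foldl_le_mono
      intro b x _
      exact hmono b x


-- ---- A's row DP computes bestAll ----

-- one outer-loop step of A's DP, exactly as in pvLcsA
def stepA (s t : List Char) (pb : List Int × Int) (i : Int) : List Int × Int :=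
  let inner := (PySem.List.pyRange 1 ((t.length : Int) + 1) 1).foldl
    (fun (cb : List Int × Int) j =>
      if PySem.List.pyGet? s (i - 1) == PySem.List.pyGet? t (j - 1) then
        let v := PySem.List.pyGetD pb.1 (j - 1) 0 + 1
        (cb.1.set j.toNat v, max cb.2 v)
      else
        (cb.1.set j.toNat 0, cb.2))
    (List.replicate ((t.length : Int) + 1).toNat 0, pb.2)
  (inner.1, inner.2)

lemma lcsA_fold (s t : List Char) (h : ¬(s = [] ∨ t = [])) :
    pvLcsA s t = ((PySem.List.pyRange 1 ((s.length : Int) + 1) 1).foldl (stepA s t)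
      (List.replicate ((t.length : Int) + 1).toNat 0, 0)).2 := by
  unfold pvLcsA stepA
  rw [if_neg h]

-- `prev` before processing 0-based row i; `partL` is `curr` after the first k inner iterations of row i
def prevL (s t : List Char) (i : Nat) : List Int :=
  (List.range (t.length + 1)).map (fun l => (pvUp s t i l : Int))

def partL (s t : List Char) (i k : Nat) : List Int :=
  (List.range (t.length + 1)).map (fun l => if 1 ≤ l ∧ l ≤ k then (runTo s t i (l - 1) : Int) else 0)

lemma pvUp_zero_left (s t : List Char) (l : Nat) : pvUp s t 0 l = 0 := by cases l <;> rfl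
lemma pvUp_zero_right (s t : List Char) (i : Nat) : pvUp s t i 0 = 0 := by cases i <;> rfl

lemma prevL_zero (s t : List Char) : prevL s t 0 = List.replicate (t.length + 1) 0 := by
  unfold prevL
  rw [List.map_congr_left (g := fun _ => (0 : Int)) (fun l _ => by rw [pvUp_zero_left]; rfl),
    List.map_const', List.length_range]

lemma partL_zero (s t : List Char) (i : Nat) :
    partL s t i 0 = List.replicate (t.length + 1) 0 := by
  unfold partL
  rw [List.map_congr_left (g := fun _ => (0 : Int)) (fun l _ => by rw [if_neg (by omega)]),
    List.map_const', List.length_range]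

lemma partL_full (s t : List Char) (i : Nat) : partL s t i t.length = prevL s t (i + 1) := by
  unfold partL prevL
  apply List.map_congr_left
  intro l hl
  have hl' : l < t.length + 1 := List.mem_range.mp hl
  cases l with
  | zero => rw [if_neg (by omega), pvUp_zero_right]; rfl
  | succ l' => rw [if_pos (by omega)]; rfl

lemma partL_set (s t : List Char) (i k : Nat) (hk : k < t.length) :
    (partL s t i k).set (k + 1) (runTo s t i k : Int) = partL s t i (k + 1) := by
  apply List.ext_getElem
  · simp [partL]
  · intro p h1 h2
    simp only [partL, List.length_set, List.length_map, List.length_range] at h1 h2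
    rw [List.getElem_set]
    simp only [partL, List.getElem_map, List.getElem_range]
    by_cases hp : k + 1 = p
    · rw [if_pos hp, if_pos (by omega)]
      subst hp
      simp
    · rw [if_neg hp]
      by_cases hc : 1 ≤ p ∧ p ≤ k
      · rw [if_pos hc, if_pos (by omega)]
      · rw [if_neg hc, if_neg (by omega)]

lemma innerA_spec (s t : List Char) {i : Nat} (hi : i < s.length) (b0 : Int) (hb0 : 0 ≤ b0) :
    stepA s t (prevL s t i, b0) (1 + (i : Int))
      = (prevL s t (i + 1),
         (List.range t.length).foldl (fun b l => max b (runTo s t i l : Int)) b0) := by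
  unfold stepA
  rw [PySem.List.pyRange_one 1 ((t.length : Int) + 1)]
  have hn : (((t.length : Int) + 1) - 1).toNat = t.length := by omega
  have hn2 : ((t.length : Int) + 1).toNat = t.length + 1 := by omega
  rw [hn, hn2, List.foldl_map]
  have aux : ∀ k, k ≤ t.length →
      (List.range k).foldl
        (fun (cb : List Int × Int) (l : Nat) =>
          if PySem.List.pyGet? s (1 + (i : Int) - 1) == PySem.List.pyGet? t (1 + (l : Int) - 1) then
            (cb.1.set (1 + (l : Int)).toNat (PySem.List.pyGetD (prevL s t i) (1 + (l : Int) - 1) 0 + 1),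
             max cb.2 (PySem.List.pyGetD (prevL s t i) (1 + (l : Int) - 1) 0 + 1))
          else
            (cb.1.set (1 + (l : Int)).toNat 0, cb.2))
        (List.replicate (t.length + 1) 0, b0)
      = (partL s t i k, (List.range k).foldl (fun b l => max b (runTo s t i l : Int)) b0) := by
    intro k
    induction k with
    | zero =>
      intro _
      rw [List.range_zero, List.foldl_nil, List.foldl_nil, partL_zero]
    | succ k ih =>
      intro hk
      rw [List.range_succ, List.foldl_append, List.foldl_append, ih (by omega),
        List.foldl_cons, List.foldl_nil, List.foldl_cons, List.foldl_nil]
      have hkt : k < t.length := by omega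
      have e1 : 1 + (i : Int) - 1 = (i : Int) := by ring
      have e2 : 1 + (k : Int) - 1 = (k : Int) := by ring
      have e3 : (1 + (k : Int)).toNat = k + 1 := by omega
      rw [e1, e2, e3, PySem.List.pyGet?_of_nonneg s (by omega),
        PySem.List.pyGet?_of_nonneg t (by omega)]
      have e4 : ((i : Int)).toNat = i := by omega
      have e5 : ((k : Int)).toNat = k := by omega
      rw [e4, e5, List.getElem?_eq_getElem hi, List.getElem?_eq_getElem hkt]
      have hgetD : PySem.List.pyGetD (prevL s t i) (k : Int) 0 = (pvUp s t i k : Int) := by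
        rw [PySem.List.pyGetD_natCast]
        exact PySem.List.getD_map_range _ _ _ _ (by omega)
      have hbk : b0 ≤ (List.range k).foldl (fun b l => max b (runTo s t i l : Int)) b0 :=
        pv_foldl_le_mono _ _ (fun b x _ => le_max_left _ _) b0
      by_cases he : s[i]'hi = t[k]'hkt
      · rw [if_pos (by simp [he])]
        have hch : chEq s t i k = true :=
          chEq_of_getElem? hi hkt
            (by rw [List.getElem?_eq_getElem hi, List.getElem?_eq_getElem hkt]; simp [he])
        have hv : (pvUp s t i k : Int) + 1 = (runTo s t i k : Int) := by
          rw [runTo_eq_ite, if_pos hch]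
          push_cast
          ring
        rw [hgetD, hv, partL_set s t i k hkt]
      · rw [if_neg (by simp [he])]
        have hch : chEq s t i k = false := by
          by_contra hc
          have h2 := chEq_true_elim (by simpa using (Bool.not_eq_false _).mp hc)
          rw [List.getElem?_eq_getElem hi, List.getElem?_eq_getElem hkt] at h2
          exact he (by simpa using h2.2.2)
        have hz : (runTo s t i k : Int) = 0 := by
          rw [runTo_eq_ite, hch]
          rfl
        rw [hz, max_eq_left (by omega)]
        have hz' : (0 : Int) = (runTo s t i k : Int) := by rw [hz]
        rw [hz', partL_set s t i k hkt]
  rw [aux t.length le_rfl, partL_full]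

lemma lcsA_eq (s t : List Char) (hs : s ≠ []) (ht : t ≠ []) : pvLcsA s t = bestAll s t := by
  rw [lcsA_fold s t (by simp [hs, ht])]
  rw [PySem.List.pyRange_one 1 ((s.length : Int) + 1)]
  have hm : (((s.length : Int) + 1) - 1).toNat = s.length := by omega
  have hn2 : ((t.length : Int) + 1).toNat = t.length + 1 := by omega
  rw [hm, hn2, List.foldl_map]
  have aux : ∀ r, r ≤ s.length →
      (List.range r).foldl (fun pb (k : Nat) => stepA s t pb (1 + (k : Int)))
        (List.replicate (t.length + 1) 0, 0)
      = (prevL s t r,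
         (List.range r).foldl
           (fun b i' => (List.range t.length).foldl (fun b l => max b (runTo s t i' l : Int)) b) 0) := by
    intro r
    induction r with
    | zero =>
      intro _
      rw [List.range_zero, List.foldl_nil, List.foldl_nil, prevL_zero]
    | succ r ih =>
      intro hr
      rw [List.range_succ, List.foldl_append, List.foldl_append, ih (by omega),
        List.foldl_cons, List.foldl_nil, List.foldl_cons, List.foldl_nil]
      have hb : (0 : Int) ≤ (List.range r).foldl
          (fun b i' => (List.range t.length).foldl (fun b l => max b (runTo s t i' l : Int)) b) 0 :=
        pv_foldl_le_mono _ _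
          (fun b x _ => pv_foldl_le_mono _ _ (fun b' x' _ => le_max_left _ _) b) 0
      exact innerA_spec s t (by omega) _ hb
  rw [aux s.length le_rfl]
  rfl


-- ---- symmetric containment lemma and Python max ----

lemma infix_bestAll_right {g st : List Char} (hst : st ≠ []) (h : st <:+: g) :
    bestAll g st = (st.length : Int) := by
  obtain ⟨u, v, rfl⟩ := h
  have hn : 1 ≤ st.length := List.length_pos_iff.mpr hst
  have hlen : (u ++ st ++ v).length = u.length + st.length + v.length := by simp; omega
  have hrun : st.length ≤ runTo (u ++ st ++ v) st (u.length + st.length - 1) (st.length - 1) := by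
    apply runTo_ge _ _ st.length _ _ (by omega) (by omega) (by omega)
    intro k hk
    apply chEq_of_getElem? (by simp; omega) (by omega)
    have hx : u.length + st.length - 1 - k = u.length + (st.length - 1 - k) := by omega
    rw [hx, List.append_assoc, List.getElem?_append_right (by omega)]
    have hy : u.length + (st.length - 1 - k) - u.length = st.length - 1 - k := by omega
    rw [hy, List.getElem?_append_left (by omega)]
  have hub := bestAll_ub (u ++ st ++ v) st (i := u.length + st.length - 1) (j := st.length - 1)
    (by simp; omega) (by omega)
  have hle : bestAll (u ++ st ++ v) st ≤ (st.length : Int) := by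
    apply bestAll_le_of
    · intro i j hi hj
      have := runTo_le_right (u ++ st ++ v) st i j
      omega
    · omega
  omega

lemma pv_max?_eq {l : List Int} {x : Int} (hx : x ∈ l) (hub : ∀ y ∈ l, y ≤ x) :
    PySem.List.max? l (fun y => y) = some x := by
  cases l with
  | nil => simp at hx
  | cons h tl =>
    rw [PySem.List.max?_id_cons]
    congr 1
    have h1 := PySem.List.le_foldl_max tl h
    apply le_antisymm
    · rcases PySem.List.foldl_max_mem tl h with h2 | h2
      · rw [h2]; exact hub h (by simp)
      · exact hub _ (by simp [Or.inr h2])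
    · rcases List.mem_cons.mp hx with rfl | hx'
      · exact h1.1
      · exact h1.2 x hx'

theorem partial_match_score_py_spec : Claim_equal_partial_match_score_py := by
  intro game_norm stem_norm _hdom
  unfold Spec_partial_match_score_py
  unfold partial_match_score_py partial_match_score_py_alt
  set gl := game_norm.toList with hgl
  set tl := stem_norm.toList with htl
  by_cases h0 : gl = [] ∨ tl = []
  · rw [if_pos h0, if_pos h0]
  rw [if_neg h0, if_neg h0]
  push_neg at h0
  obtain ⟨hg0, ht0⟩ := h0
  by_cases h1 : gl = tl
  · rw [if_pos h1, if_pos h1]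
  rw [if_neg h1, if_neg h1]
  have hlcs : pvLcsA gl tl = bestAll gl tl := lcsA_eq gl tl hg0 ht0
  have hpref : pvPrefLoopA gl tl
      (PySem.List.pyRange 0 (min (gl.length : Int) (tl.length : Int)) 1) 0
        = (cp gl tl : Int) := by
    have := prefLoopA_spec gl tl (min gl.length tl.length) 0 0 (by omega) (by omega)
    simpa using this
  have hsuf : pvSufLoopA gl tl
      (PySem.List.pyRange 1 (min (gl.length : Int) (tl.length : Int) + 1) 1) 0
        = (cp gl.reverse tl.reverse : Int) := by
    have := sufLoopA_spec gl tl (min gl.length tl.length) 1 0 (by omega) (by omega) (by omega)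
    simpa using this
  rw [hpref, hsuf, hlcs]
  simp only []
  set P := (cp gl tl : Int) with hP
  set S := (cp gl.reverse tl.reverse : Int) with hS
  set B := bestAll gl tl with hB
  have hPg : P ≤ (gl.length : Int) := by have := cp_le_left gl tl; omega
  have hPt : P ≤ (tl.length : Int) := by have := cp_le_right gl tl; omega
  have hSg : S ≤ (gl.length : Int) := by
    have := cp_le_left gl.reverse tl.reverse
    simp only [List.length_reverse] at this
    omega
  have hSt : S ≤ (tl.length : Int) := by
    have := cp_le_right gl.reverse tl.reverse
    simp only [List.length_reverse] at this
    omega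
  have hPB : 1 ≤ P → P ≤ B := by
    intro h
    exact cp_le_bestAll gl tl (by omega)
  have hSB : 1 ≤ S → S ≤ B := by
    intro h
    exact csuf_le_bestAll gl tl (by omega)
  have hB0 : 0 ≤ B := bestAll_nonneg gl tl
  by_cases hin1 : PySem.Chars.isIn gl tl = true
  · -- game contained in stem
    rw [if_pos hin1, if_pos hin1]
    have hinf : gl <:+: tl := (PySem.Chars.isIn_iff_infix gl tl).mp hin1
    have hin2 : ¬ PySem.Chars.isIn tl gl = true := by
      intro hc
      exact h1 (((PySem.Chars.isIn_iff_infix tl gl).mp hc).sublist.eq_of_length_le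
        hinf.length_le).symm
    rw [if_neg hin2]
    have hBeq : B = (gl.length : Int) := infix_bestAll hg0 hinf
    unfold pvMIN_PARTIAL_OVERLAP
    split_ifs with c1 c2 c3 <;>
      (apply pv_max?_eq
       · simp
       · intro y hy
         simp at hy
         omega)
  rw [if_neg hin1]
  by_cases hin2 : PySem.Chars.isIn tl gl = true
  · -- stem contained in game
    rw [if_pos hin2, if_pos hin2]
    have hinf : tl <:+: gl := (PySem.Chars.isIn_iff_infix tl gl).mp hin2
    have hBeq : B = (tl.length : Int) := infix_bestAll_right ht0 hinf
    unfold pvMIN_PARTIAL_OVERLAP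
    split_ifs with c1 c2 c3 <;>
      (apply pv_max?_eq
       · simp
       · intro y hy
         simp at hy
         omega)
  rw [if_neg hin2]
  -- neither contains the other: both sides reduce to the longest common substring
  have hBalt : (PySem.List.pyRange (-((gl.length : Int) - 1)) (tl.length : Int) 1).foldl
      (fun best d => pvWhileB gl tl d gl.length (if d < 0 then -d else 0) 0 best) 0 = B :=
    altBest_eq gl tl
  rw [hBalt]
  unfold pvMIN_PARTIAL_OVERLAP
  split_ifs with c1 c2 c3 c4 <;>
    first
      | (exfalso; omega)
      | (apply pv_max?_eq
         · simp
         · intro y hy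
           simp at hy
           omega)
      | (exact (PySem.List.max?_eq_none_iff _ _).mpr rfl)
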